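-- pv_equiv track=rewrite | github.com/crholzin/PHYS566-GroupAssignment1 | problem3.py | gene0
-- ===== SOURCE A (Python) =====
-- def rg(n):
--     return range(2*n+1)
--
-- def gene0(n):
--     '''
--     generate the initial grid
--     with -1 representing points beyond boundary
--     and 0 the empty grid sites
--     and 1 the occupied sites
--     '''
--     m=[]
--     for i in rg(n):
--         t=[]
--         for j in rg(n):
--             if (i-n)**2+(j-n)**2>n**2:
--                 t+=[-1]
--             else:
--                 t+=[0]
--         m+=[t]
--     m[n][n]=1
--     return m
-- ===== SOURCE B (Python) =====
-- import math
--
-- def gene0(n):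
--     '''
--     generate the initial grid
--     with -1 representing points beyond boundary
--     and 0 the empty grid sites
--     and 1 the occupied sites
--     '''
--     w = 2*n + 1
--     m = []
--     for i in range(w):
--         dy = i - n
--         r = math.isqrt(n*n - dy*dy)
--         m.append([-1]*(n - r) + [0]*(2*r + 1) + [-1]*(n - r))
--     m[n][n] = 1
--     return m
-- ===== Notes on version B (the rewrite author's own statement) =====
-- stated objective: simpler
-- what changed: B computes one integer-sqrt half-width r per row and builds the row as three constant blocks [-1]*(n-r)+[0]*(2r+1)+[-1]*(n-r), replacing A's per-cell squared-distance test; Pre_ excludes negative n, where both implementations raise IndexError.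
import Mathlib
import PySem

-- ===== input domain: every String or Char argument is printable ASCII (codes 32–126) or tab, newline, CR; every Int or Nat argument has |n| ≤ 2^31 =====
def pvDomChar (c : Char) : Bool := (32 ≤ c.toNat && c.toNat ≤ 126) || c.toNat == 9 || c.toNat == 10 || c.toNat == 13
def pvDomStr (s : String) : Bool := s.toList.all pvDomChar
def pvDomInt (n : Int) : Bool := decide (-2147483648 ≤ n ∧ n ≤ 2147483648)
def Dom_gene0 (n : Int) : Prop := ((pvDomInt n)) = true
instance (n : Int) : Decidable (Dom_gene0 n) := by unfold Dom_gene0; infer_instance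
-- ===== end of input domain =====

-- B replaces the per-cell squared-distance test with a per-row integer-sqrt half-width
-- and builds each row from three constant blocks (objective: simpler; same asymptotic cost).
-- Pre_gene0 excludes negative n, where both Pythons raise IndexError (the grid is empty).
-- ===== PORT A =====
def gene0 (n : Int) : List (List Int) :=
  let m := (PySem.List.pyRange 0 (2*n+1) 1).foldl (fun m i =>
    m ++ [(PySem.List.pyRange 0 (2*n+1) 1).foldl (fun t j =>
      t ++ [if (i-n)^2 + (j-n)^2 > n^2 then (-1 : Int) else 0]) []]) []
  m.modify n.toNat (fun row => row.set n.toNat 1)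

-- ===== PORT B =====
def gene0_alt (n : Int) : List (List Int) :=
  let m := (PySem.List.pyRange 0 (2*n+1) 1).foldl (fun m i =>
    let dy := i - n
    let r : Int := ((n*n - dy*dy).toNat.sqrt : Int)
    m ++ [List.replicate (n-r).toNat (-1) ++ List.replicate (2*r+1).toNat 0
          ++ List.replicate (n-r).toNat (-1)]) []
  m.modify n.toNat (fun row => row.set n.toNat 1)

-- ===== PRECONDITION & SPEC =====
-- Pre_gene0: the Python A raises IndexError for negative n (the grid is empty, setting the centre fails).
def Pre_gene0 (n : Int) : Prop := 0 ≤ n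
instance (n : Int) : Decidable (Pre_gene0 n) := by unfold Pre_gene0; infer_instance
def pvWitness_gene0 : Int := (3)
def Spec_gene0 (n : Int) (out : List (List Int)) : Prop := out = gene0_alt n
instance (n : Int) (out : List (List Int)) : Decidable (Spec_gene0 n out) := by unfold Spec_gene0; infer_instance

-- ===== CLAIM (what is proved, stated in full; the proofs are below) =====
def Claim_equal_gene0 : Prop := ∀ (n : Int), Dom_gene0 n → Pre_gene0 n → Spec_gene0 n (gene0 n)

-- ===== LEMMAS AND PROOFS =====
-- One row of A's grid equals B's three-block row, for any row index i of the grid.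
lemma row_eq (n i : Int) (hn : 0 ≤ n) (hi0 : 0 ≤ i) (hi : i < 2*n+1) :
    (PySem.List.pyRange 0 (2*n+1) 1).map
        (fun j => if (i-n)^2 + (j-n)^2 > n^2 then (-1 : Int) else 0)
      = List.replicate (n - ((n*n - (i-n)*(i-n)).toNat.sqrt : Int)).toNat (-1)
        ++ List.replicate (2*((n*n - (i-n)*(i-n)).toNat.sqrt : Int)+1).toNat 0
        ++ List.replicate (n - ((n*n - (i-n)*(i-n)).toNat.sqrt : Int)).toNat (-1) := by
  set f : Int → Int := fun j => if (i-n)^2 + (j-n)^2 > n^2 then (-1 : Int) else 0 with hfdef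
  set dy := i - n with hdydef
  have hdy : dy*dy ≤ n*n := by nlinarith
  set S : Nat := (n*n - dy*dy).toNat with hSdef
  have hS : (S : Int) = n*n - dy*dy := Int.toNat_of_nonneg (by omega)
  set r : Int := (S.sqrt : Int) with hrdef
  have hr0 : (0:Int) ≤ r := Int.natCast_nonneg _
  have h1 : r*r ≤ n*n - dy*dy := by rw [← hS, hrdef]; exact_mod_cast Nat.sqrt_le S
  have h2 : n*n - dy*dy < (r+1)*(r+1) := by
    rw [← hS, hrdef]; exact_mod_cast Nat.lt_succ_sqrt S
  have hrn : r ≤ n := by nlinarith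
  have p1 : (PySem.List.pyRange 0 (n-r) 1).map f = List.replicate (n-r).toNat (-1) := by
    rw [List.eq_replicate_iff]
    refine ⟨by simp [PySem.List.length_pyRange_one], ?_⟩
    intro b hb
    obtain ⟨x, hx, hfx⟩ := List.mem_map.mp hb
    rw [PySem.List.mem_pyRange_one] at hx
    rw [← hfx, hfdef]
    simp only []
    rw [if_pos]
    have hx1 : r + 1 ≤ n - x := by omega
    have := mul_self_le_mul_self (by omega : (0:Int) ≤ r+1) hx1
    nlinarith
  have p2 : (PySem.List.pyRange (n-r) (n+r+1) 1).map f
      = List.replicate (2*r+1).toNat 0 := by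
    rw [List.eq_replicate_iff]
    refine ⟨by simp [PySem.List.length_pyRange_one]; omega, ?_⟩
    intro b hb
    obtain ⟨x, hx, hfx⟩ := List.mem_map.mp hb
    rw [PySem.List.mem_pyRange_one] at hx
    rw [← hfx, hfdef]
    simp only []
    rw [if_neg]
    simp only [not_lt]
    have hsq : (x-n)^2 ≤ r^2 := sq_le_sq' (by omega) (by omega)
    nlinarith
  have p3 : (PySem.List.pyRange (n+r+1) (2*n+1) 1).map f
      = List.replicate (n-r).toNat (-1) := by
    rw [List.eq_replicate_iff]
    refine ⟨by simp [PySem.List.length_pyRange_one]; omega, ?_⟩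
    intro b hb
    obtain ⟨x, hx, hfx⟩ := List.mem_map.mp hb
    rw [PySem.List.mem_pyRange_one] at hx
    rw [← hfx, hfdef]
    simp only []
    rw [if_pos]
    have hx1 : r + 1 ≤ x - n := by omega
    have := mul_self_le_mul_self (by omega : (0:Int) ≤ r+1) hx1
    nlinarith
  rw [PySem.List.pyRange_one_append 0 (n-r) (2*n+1) (by omega) (by omega),
      PySem.List.pyRange_one_append (n-r) (n+r+1) (2*n+1) (by omega) (by omega),
      List.map_append, List.map_append, p1, p2, p3, List.append_assoc]

-- ===== VERDICT (by name: the statement is the Claim_ definition above) =====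
theorem gene0_spec : Claim_equal_gene0 := by
  intro n _ hn
  unfold Spec_gene0 gene0 gene0_alt
  simp only [PySem.List.foldl_append_singleton_eq_map, List.nil_append]
  congr 1
  apply List.map_congr_left
  intro i hi
  rw [PySem.List.mem_pyRange_one] at hi
  exact row_eq n i hn hi.1 hi.2
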